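-- pv_equiv track=rewrite | github.com/luke-goddard/foobar-python | level_1/challenge_1/cake_str.py | solution
-- ===== SOURCE A (Python) =====
-- def solution(cake_str):
--     for pos in range(1, len(cake_str) -1):
--         pot_pattern = get_next_rep(cake_str, pos)           # Get the next repetition
--         if pot_pattern is None:                             # No remaining split options found
--             return 1
--         if len(set(cake_str.split(pot_pattern))) == 1:      # Should only be one unique pattern
--             return len(cake_str.split(pot_pattern)) - 1     # Spliting the str by pattern gives 1 too many
--     return 1
--
-- def get_next_rep(cake_str, pos):
--     for x in range(pos, len(cake_str)-1):
--         if cake_str[x] == cake_str[0]: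
--             return cake_str[0:x]                            # return the new pattern
--     return None
-- ===== SOURCE B (Python) =====
-- def solution(cake_str):
--     n = len(cake_str)
--     for d in range(1, n + 1):
--         if n % d == 0 and cake_str[:d] * (n // d) == cake_str:
--             return n // d
--     return 1
-- ===== Notes on version B (the rewrite author's own statement) =====
-- stated objective: faster
-- what changed: A scans every position holding the first character and tests each candidate prefix with str.split plus a set; B iterates the candidate lengths 1..n directly, keeps only divisors of n, and compares prefix repetition against the string, returning n//d for the smallest dividing period.
-- intended difference: On two-character strings whose two characters are equal A returns 1, because its candidate scan stops one position short of the single-character slice; B returns 2, the intended maximal number of equal slices. — e.g. on solution("aa"): A returns 1, B returns 2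
import Mathlib
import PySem

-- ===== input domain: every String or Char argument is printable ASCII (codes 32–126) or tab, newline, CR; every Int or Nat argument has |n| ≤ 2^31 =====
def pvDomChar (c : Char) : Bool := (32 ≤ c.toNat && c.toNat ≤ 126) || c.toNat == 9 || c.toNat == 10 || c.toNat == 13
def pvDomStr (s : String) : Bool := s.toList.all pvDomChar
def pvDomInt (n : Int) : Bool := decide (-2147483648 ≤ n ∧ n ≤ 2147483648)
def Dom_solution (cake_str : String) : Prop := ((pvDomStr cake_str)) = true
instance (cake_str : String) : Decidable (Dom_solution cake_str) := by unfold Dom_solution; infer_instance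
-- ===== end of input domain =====

-- B replaces A's scan-positions-of-first-char + str.split/set test by a direct scan of the
-- candidate lengths 1..n keeping only divisors of n, comparing prefix*(n//d) with the string
-- (objective: faster; measurably so in a timing run).

-- ===== PORT A =====
-- for x in range(pos, len(cake_str)-1): if cake_str[x] == cake_str[0]: return cake_str[0:x]
def gnrLoop (cake_str : String) : List Int → Option String
  | [] => none
  | x :: rest =>
    if PySem.Str.pyGet? cake_str x == PySem.Str.pyGet? cake_str 0 then
      some (PySem.Str.slice cake_str (some 0) (some x))
    else gnrLoop cake_str rest

def get_next_rep (cake_str : String) (pos : Int) : Option String :=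
  gnrLoop cake_str (PySem.List.pyRange pos (PySem.Str.len cake_str - 1) 1)

-- the body of A's 'for pos in range(1, len(cake_str)-1)' loop
def solLoop (cake_str : String) : List Int → Int
  | [] => 1
  | pos :: rest =>
    match get_next_rep cake_str pos with
    | none => 1
    | some pot_pattern =>
      match PySem.Str.split? cake_str pot_pattern with
      | none => 1  -- unreachable: the pattern is always a nonempty prefix of cake_str
      | some parts =>
        if PySem.Set.len (PySem.Set.ofList parts) == 1 then
          (parts.length : Int) - 1
        else solLoop cake_str rest

def solution (cake_str : String) : Int :=
  solLoop cake_str (PySem.List.pyRange 1 (PySem.Str.len cake_str - 1) 1)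

-- ===== PORT B =====
-- Python str * int (repetition)
def pyStrMul (s : String) (k : Int) : String :=
  String.ofList ((List.replicate k.toNat s.toList).flatten)

-- the body of B's 'for d in range(1, n+1)' loop
def altLoop (cake_str : String) (n : Int) : List Int → Int
  | [] => 1
  | d :: rest =>
    if PySem.Int.mod n d == 0 &&
       (pyStrMul (PySem.Str.slice cake_str none (some d)) (PySem.Int.floordiv n d) == cake_str) then
      PySem.Int.floordiv n d
    else altLoop cake_str n rest

def solution_alt (cake_str : String) : Int :=
  let n := PySem.Str.len cake_str
  altLoop cake_str n (PySem.List.pyRange 1 (n + 1) 1)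

-- ===== PRECONDITION & SPEC =====
-- On two-character strings whose two characters are equal A returns 1, because its candidate scan
-- stops one position short of the single-character slice; B returns 2, the intended answer.
def D_solution (cake_str : String) : Prop :=
  cake_str.toList.length = 2 ∧ cake_str.toList[0]? = cake_str.toList[1]?
instance (cake_str : String) : Decidable (D_solution cake_str) := by unfold D_solution; infer_instance

def Spec_solution (cake_str : String) (out : Int) : Prop :=
  ¬ D_solution cake_str → out = solution_alt cake_str
instance (cake_str : String) (out : Int) : Decidable (Spec_solution cake_str out) := by
  unfold Spec_solution; infer_instance

def pvDiffWitness_solution : String := "aa"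
def pvDiffWitnessOut_solution : Int × Int := (1, 2)

-- ===== CLAIM (what is proved, stated in full; the proofs are below) =====
def Claim_unchanged_solution : Prop :=
  ∀ (cake_str : String), Dom_solution cake_str → Spec_solution cake_str (solution cake_str)
def Claim_changed_solution : Prop :=
  Dom_solution (pvDiffWitness_solution) ∧ D_solution (pvDiffWitness_solution) ∧
  solution (pvDiffWitness_solution) = pvDiffWitnessOut_solution.1 ∧
  solution_alt (pvDiffWitness_solution) = pvDiffWitnessOut_solution.2 ∧
  pvDiffWitnessOut_solution.1 ≠ pvDiffWitnessOut_solution.2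
def Claim_exact_solution : Prop :=
  ∀ (cake_str : String), Dom_solution cake_str → D_solution cake_str →
    solution cake_str ≠ solution_alt cake_str

-- ===== LEMMAS AND PROOFS =====

-- x is a length into which l splits evenly as repetitions of its prefix of length x
def GoodP (l : List Char) (x : Nat) : Prop :=
  0 < x ∧ x ∣ l.length ∧ (List.replicate (l.length / x) (l.take x)).flatten = l

def goodP_dec (l : List Char) : DecidablePred (GoodP l) := fun x => by
  unfold GoodP; infer_instance

theorem goodP_len (l : List Char) (h : l ≠ []) : GoodP l l.length := by
  refine ⟨List.length_pos_iff.mpr h, dvd_refl _, ?_⟩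
  simp [Nat.div_self (List.length_pos_iff.mpr h)]

theorem length_flatten_replicate (k : Nat) (p : List Char) :
    (List.replicate k p).flatten.length = k * p.length := by
  induction k with
  | zero => simp
  | succ k ih => simp [List.replicate_succ, ih, Nat.succ_mul]; ring

-- String.ofList equality as list equality
theorem beq_ofList (cs : List Char) (s : String) :
    (String.ofList cs == s) = decide (cs = s.toList) := by
  rw [Bool.eq_iff_iff]; simp [beq_iff_eq]
  constructor
  · rintro rfl; simp
  · rintro rfl; simp

-- ----- splitOn (str.split) characterisation -----

theorem go_acc (p : List Char) (fuel : Nat) (l cur : List Char) (acc : List (List Char)) :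
    PySem.Chars.splitOn.go p fuel l cur acc =
      acc.reverse ++ PySem.Chars.splitOn.go p fuel l cur [] := by
  induction fuel generalizing l cur acc with
  | zero => simp [PySem.Chars.splitOn.go]
  | succ fuel ih =>
    cases l with
    | nil => simp [PySem.Chars.splitOn.go]
    | cons c rest =>
      by_cases hp : p.isPrefixOf (c :: rest)
      · simp only [PySem.Chars.splitOn.go, hp, if_true]
        rw [ih _ _ (cur.reverse :: acc), ih _ _ [cur.reverse]]
        simp
      · simp only [PySem.Chars.splitOn.go, hp, if_false]
        exact ih _ _ acc

theorem go_ne_nil (p : List Char) (fuel : Nat) (l cur : List Char) (acc : List (List Char)) :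
    PySem.Chars.splitOn.go p fuel l cur acc ≠ [] := by
  induction fuel generalizing l cur acc with
  | zero => simp [PySem.Chars.splitOn.go]
  | succ fuel ih =>
    cases l with
    | nil => simp [PySem.Chars.splitOn.go]
    | cons c rest =>
      by_cases hp : p.isPrefixOf (c :: rest)
      · simp only [PySem.Chars.splitOn.go, hp, if_true]; exact ih _ _ _
      · simp only [PySem.Chars.splitOn.go, hp, if_false]; exact ih _ _ _

theorem intercalate_cons_ne {α : Type} (p a : List α) (rest : List (List α)) (h : rest ≠ []) :
    List.intercalate p (a :: rest) = a ++ p ++ List.intercalate p rest := by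
  cases rest with
  | nil => exact absurd rfl h
  | cons b t => simp [List.intercalate, List.intersperse]

theorem go_recon (p : List Char) (hp : p ≠ []) (fuel : Nat) :
    ∀ (l cur : List Char), l.length < fuel →
      List.intercalate p (PySem.Chars.splitOn.go p fuel l cur []) = cur.reverse ++ l := by
  induction fuel with
  | zero => intro l cur h; omega
  | succ fuel ih =>
    intro l cur h
    cases l with
    | nil => simp [PySem.Chars.splitOn.go, List.intercalate, List.intersperse]
    | cons c rest =>
      by_cases hpre : p.isPrefixOf (c :: rest)
      · simp only [PySem.Chars.splitOn.go, hpre, if_true]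
        rw [go_acc]
        simp only [List.reverse_cons, List.reverse_nil, List.nil_append, List.singleton_append]
        rw [intercalate_cons_ne _ _ _ (go_ne_nil p fuel _ [] [])]
        obtain ⟨t, ht⟩ := List.isPrefixOf_iff_prefix.mp hpre
        have hplen : 0 < p.length := List.length_pos_iff.mpr hp
        have hdlen : ((c :: rest).drop p.length).length < fuel := by
          simp only [List.length_drop, List.length_cons]
          simp only [List.length_cons] at h
          omega
        rw [ih _ [] hdlen]
        simp only [List.reverse_nil, List.nil_append]
        rw [← ht, List.drop_left]
        simp [List.append_assoc]
      · simp only [PySem.Chars.splitOn.go]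
        rw [if_neg hpre]
        have : rest.length < fuel := by
          simp only [List.length_cons] at h; omega
        rw [ih rest (c :: cur) this]
        simp

theorem go_rep (p : List Char) (hp : p ≠ []) (fuel : Nat) :
    ∀ (k : Nat) (acc : List (List Char)), k * p.length < fuel →
      PySem.Chars.splitOn.go p fuel ((List.replicate k p).flatten) [] acc =
        acc.reverse ++ List.replicate (k + 1) [] := by
  induction fuel with
  | zero => intro k acc h; omega
  | succ fuel ih =>
    intro k acc h
    cases k with
    | zero => simp [PySem.Chars.splitOn.go]
    | succ k =>
      have hplen : 0 < p.length := List.length_pos_iff.mpr hp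
      have hflat : (List.replicate (k + 1) p).flatten = p ++ (List.replicate k p).flatten := by
        rw [List.replicate_succ, List.flatten_cons]
      obtain ⟨c, p', hpc⟩ : ∃ c p', p = c :: p' := by
        cases p with
        | nil => exact absurd rfl hp
        | cons c p' => exact ⟨c, p', rfl⟩
      have hpre : p.isPrefixOf (p ++ (List.replicate k p).flatten) :=
        List.isPrefixOf_iff_prefix.mpr ⟨_, rfl⟩
      rw [hflat]
      rw [show p ++ (List.replicate k p).flatten = c :: (p' ++ (List.replicate k p).flatten) by
        rw [hpc]; simp]
      have hpre' : p.isPrefixOf (c :: (p' ++ (List.replicate k p).flatten)) := by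
        rw [hpc] at hpre ⊢; simpa using hpre
      simp only [PySem.Chars.splitOn.go, hpre', if_true]
      have hdrop : (c :: (p' ++ (List.replicate k p).flatten)).drop p.length =
          (List.replicate k p).flatten := by
        rw [show c :: (p' ++ (List.replicate k p).flatten) = p ++ (List.replicate k p).flatten by
          rw [hpc]; simp]
        exact List.drop_left
      rw [hdrop]
      have hfuel : k * p.length < fuel := by
        have hs : (k + 1) * p.length = k * p.length + p.length := by ring
        omega
      simp only [List.reverse_nil]
      rw [ih k ([] :: acc) hfuel]
      simp [List.replicate_succ]

theorem splitOn_rep (p : List Char) (hp : p ≠ []) (k : Nat) :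
    PySem.Chars.splitOn ((List.replicate k p).flatten) p = List.replicate (k + 1) [] := by
  unfold PySem.Chars.splitOn
  have hlen : (List.replicate k p).flatten.length = k * p.length := length_flatten_replicate k p
  have : k * p.length < (List.replicate k p).flatten.length + 1 := by omega
  rw [go_rep p hp _ k [] this]
  simp

theorem splitOn_intercalate (p l : List Char) (hp : p ≠ []) :
    List.intercalate p (PySem.Chars.splitOn l p) = l := by
  unfold PySem.Chars.splitOn
  rw [go_recon p hp (l.length + 1) l [] (by omega)]
  simp

theorem splitOn_head (p l : List Char) (hp : p ≠ []) (hpre : p <+: l) :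
    ∃ t, PySem.Chars.splitOn l p = [] :: t := by
  cases l with
  | nil =>
    have := List.prefix_nil.mp hpre
    exact absurd this hp
  | cons c rest =>
    unfold PySem.Chars.splitOn
    have hpre' : p.isPrefixOf (c :: rest) := List.isPrefixOf_iff_prefix.mpr hpre
    simp only [PySem.Chars.splitOn.go, hpre', if_true, List.length_cons]
    rw [go_acc]
    exact ⟨_, rfl⟩

theorem intercalate_nils (p : List Char) (j : Nat) :
    List.intercalate p (List.replicate (j + 1) []) = (List.replicate j p).flatten := by
  induction j with
  | zero => simp [List.intercalate, List.intersperse]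
  | succ j ih =>
    rw [List.replicate_succ (n := j + 1)]
    rw [intercalate_cons_ne _ _ _ (by simp)]
    rw [ih]
    rw [List.replicate_succ, List.flatten_cons]
    simp

theorem ofList_singleton_of_all {α : Type} [BEq α] [LawfulBEq α] (xs : List α) (c : α)
    (hc : c ∈ xs) (hall : ∀ a ∈ xs, a = c) : PySem.Set.ofList xs = [c] := by
  have hnd := PySem.Set.nodup_ofList xs
  have hmem : c ∈ PySem.Set.ofList xs := (PySem.Set.mem_ofList xs c).mpr hc
  have hsub : ∀ a ∈ PySem.Set.ofList xs, a = c := fun a ha =>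
    hall a ((PySem.Set.mem_ofList xs a).mp ha)
  cases hset : PySem.Set.ofList xs with
  | nil => rw [hset] at hmem; simp at hmem
  | cons a t =>
    have ha : a = c := hsub a (by rw [hset]; exact List.mem_cons_self)
    have ht : t = [] := by
      rw [List.eq_nil_iff_forall_not_mem]
      intro b hb
      have hbc : b = c := hsub b (by rw [hset]; exact List.mem_cons_of_mem _ hb)
      rw [hset] at hnd
      have := (List.nodup_cons.mp hnd).1
      rw [ha] at this
      rw [hbc] at hb
      exact this hb
    rw [ha, ht]

theorem all_eq_of_ofList_len_one {α : Type} [BEq α] [LawfulBEq α] (xs : List α)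
    (h : (PySem.Set.ofList xs).length = 1) : ∀ a ∈ xs, ∀ b ∈ xs, a = b := by
  obtain ⟨y, hy⟩ := List.length_eq_one_iff.mp h
  intro a ha b hb
  have ha' : a ∈ PySem.Set.ofList xs := (PySem.Set.mem_ofList xs a).mpr ha
  have hb' : b ∈ PySem.Set.ofList xs := (PySem.Set.mem_ofList xs b).mpr hb
  rw [hy] at ha' hb'
  simp at ha' hb'
  rw [ha', hb']

-- the split-based test of A, characterised (String level)
theorem splitTestS (s : String) (x : Nat) (h1 : 1 ≤ x) (h2 : x + 2 ≤ s.toList.length) :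
    ((PySem.Set.len (PySem.Set.ofList
        ((PySem.Chars.splitOn s.toList (s.toList.take x)).map String.ofList)) = 1) ↔
      GoodP s.toList x) ∧
    (GoodP s.toList x →
      ((PySem.Chars.splitOn s.toList (s.toList.take x)).map String.ofList).length =
        s.toList.length / x + 1) := by
  have hxn : x ≤ s.toList.length := by omega
  have hplen : (s.toList.take x).length = x := by
    rw [List.length_take]; omega
  have hp : s.toList.take x ≠ [] := by
    intro h0; rw [h0] at hplen; simp at hplen; omega
  have hpre : s.toList.take x <+: s.toList := List.take_prefix x s.toList
  have hkey : ∀ (hg : GoodP s.toList x),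
      PySem.Chars.splitOn s.toList (s.toList.take x) =
        List.replicate (s.toList.length / x + 1) [] := by
    intro hg
    obtain ⟨-, hdvd, hrep⟩ := hg
    have h' := splitOn_rep (s.toList.take x) hp (s.toList.length / x)
    rw [hrep] at h'
    exact h'
  constructor
  · constructor
    · intro hset
      have hlen1 : (PySem.Set.ofList
          ((PySem.Chars.splitOn s.toList (s.toList.take x)).map String.ofList)).length = 1 := by
        simp only [PySem.Set.len] at hset
        exact_mod_cast hset
      obtain ⟨t, ht⟩ := splitOn_head (s.toList.take x) s.toList hp hpre
      have hall := all_eq_of_ofList_len_one _ hlen1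
      have hparts : ∀ q ∈ PySem.Chars.splitOn s.toList (s.toList.take x), q = [] := by
        intro q hq
        have hmem : String.ofList q ∈
            (PySem.Chars.splitOn s.toList (s.toList.take x)).map String.ofList :=
          List.mem_map_of_mem hq
        have hmem0 : String.ofList [] ∈
            (PySem.Chars.splitOn s.toList (s.toList.take x)).map String.ofList := by
          rw [ht]; simp
        have heq := hall _ hmem _ hmem0
        have := congrArg String.toList heq
        simpa using this
      have hrepl : PySem.Chars.splitOn s.toList (s.toList.take x) =
          List.replicate (PySem.Chars.splitOn s.toList (s.toList.take x)).length [] :=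
        List.eq_replicate_iff.mpr ⟨rfl, hparts⟩
      have hlenpos : 1 ≤ (PySem.Chars.splitOn s.toList (s.toList.take x)).length := by
        rw [ht]; simp
      obtain ⟨j, hj⟩ : ∃ j, (PySem.Chars.splitOn s.toList (s.toList.take x)).length = j + 1 :=
        ⟨(PySem.Chars.splitOn s.toList (s.toList.take x)).length - 1, by omega⟩
      have hrecon := splitOn_intercalate (s.toList.take x) s.toList hp
      rw [hrepl, hj, intercalate_nils] at hrecon
      have hlenl : s.toList.length = j * x := by
        rw [← hrecon, length_flatten_replicate, hplen]
      have hdvd : x ∣ s.toList.length := ⟨j, by rw [hlenl]; ring⟩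
      have hdiv : s.toList.length / x = j := by
        rw [hlenl]; exact Nat.mul_div_cancel _ (by omega)
      exact ⟨by omega, hdvd, by rw [hdiv]; exact hrecon⟩
    · intro hg
      rw [hkey hg, List.map_replicate]
      have hsing := ofList_singleton_of_all
        (List.replicate (s.toList.length / x + 1) (String.ofList []))
        (String.ofList []) (by simp) (fun a ha => List.eq_of_mem_replicate ha)
      rw [PySem.Set.len, hsing]
      simp
  · intro hg
    rw [hkey hg, List.map_replicate, List.length_replicate]

-- ----- candidate positions -----

theorem cand_of_good (l : List Char) (d : Nat) (hd : GoodP l d) (hdn : d < l.length) :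
    l[d]? = l[0]? := by
  obtain ⟨hdpos, hdvd, hrep⟩ := hd
  have hplen : (l.take d).length = d := by rw [List.length_take]; omega
  have hk2 : 2 ≤ l.length / d := by
    obtain ⟨c, hc⟩ := hdvd
    have hc0 : c ≠ 0 := by rintro rfl; omega
    have hc1 : c ≠ 1 := by rintro rfl; omega
    have hq : l.length / d = c := by rw [hc]; exact Nat.mul_div_cancel_left c (by omega)
    omega
  obtain ⟨k', hk'⟩ : ∃ k', l.length / d = k' + 2 := ⟨l.length / d - 2, by omega⟩
  have hl2 : l = l.take d ++ (l.take d ++ (List.replicate k' (l.take d)).flatten) := by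
    conv_lhs => rw [← hrep]
    rw [hk']
    simp [List.replicate_succ]
  have e1 : l[d]? = (l.take d)[0]? := by
    conv_lhs => rw [hl2]
    rw [List.getElem?_append_right (by omega)]
    rw [hplen, Nat.sub_self]
    rw [List.getElem?_append_left (by omega)]
  have e2 : l[0]? = (l.take d)[0]? := by
    conv_lhs => rw [hl2]
    rw [List.getElem?_append_left (by omega)]
  rw [e1, e2]

theorem gnr_none (s : String) (pos m : Nat)
    (h : ∀ x : Nat, pos ≤ x → x < m → s.toList[x]? ≠ s.toList[0]?) :
    gnrLoop s (PySem.List.pyRange (pos : Int) (m : Int) 1) = none := by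
  have H : ∀ (k p' : Nat), pos ≤ p' → m - p' ≤ k →
      gnrLoop s (PySem.List.pyRange (p' : Int) (m : Int) 1) = none := by
    intro k
    induction k with
    | zero =>
      intro p' hpp hk
      rw [PySem.List.pyRange_one_eq_nil (by exact_mod_cast (by omega : m ≤ p'))]
      rfl
    | succ k ih =>
      intro p' hpp hk
      by_cases hm : m ≤ p'
      · rw [PySem.List.pyRange_one_eq_nil (by exact_mod_cast hm)]; rfl
      · push_neg at hm
        rw [PySem.List.pyRange_one_cons (by exact_mod_cast hm)]
        simp only [gnrLoop]
        have hcond : (PySem.Str.pyGet? s (p' : Int) == PySem.Str.pyGet? s 0) = false := by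
          have h0 : (0 : Int) = ((0 : Nat) : Int) := rfl
          rw [h0, PySem.Str.pyGet?_natCast, PySem.Str.pyGet?_natCast]
          rw [beq_eq_false_iff_ne]
          exact h p' hpp hm
        rw [if_neg (by rw [hcond]; simp)]
        rw [show ((p' : Int) + 1) = ((p' + 1 : Nat) : Int) by push_cast; ring]
        exact ih (p' + 1) (by omega) (by omega)
  exact H (m - pos) pos (le_refl _) (le_refl _)

theorem gnr_some (s : String) (pos x m : Nat) (hpx : pos ≤ x) (hxm : x < m)
    (hc : s.toList[x]? = s.toList[0]?)
    (hmin : ∀ y : Nat, pos ≤ y → y < x → s.toList[y]? ≠ s.toList[0]?) :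
    gnrLoop s (PySem.List.pyRange (pos : Int) (m : Int) 1) =
      some (String.ofList (s.toList.take x)) := by
  have hslice : PySem.Str.slice s (some 0) (some (x : Int)) = String.ofList (s.toList.take x) := by
    unfold PySem.Str.slice
    rw [PySem.Chars.slice_eq_listSlice,
      PySem.List.slice_toNat s.toList (le_refl 0) (Int.natCast_nonneg x)]
    simp
  have hhit : gnrLoop s (PySem.List.pyRange (x : Int) (m : Int) 1) =
      some (String.ofList (s.toList.take x)) := by
    rw [PySem.List.pyRange_one_cons (by exact_mod_cast hxm)]
    simp only [gnrLoop]
    rw [if_pos (by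
      have h0 : (0 : Int) = ((0 : Nat) : Int) := rfl
      rw [h0, PySem.Str.pyGet?_natCast, PySem.Str.pyGet?_natCast]
      exact beq_iff_eq.mpr hc)]
    rw [hslice]
  have H : ∀ (k p' : Nat), pos ≤ p' → p' ≤ x → x - p' ≤ k →
      gnrLoop s (PySem.List.pyRange (p' : Int) (m : Int) 1) =
        some (String.ofList (s.toList.take x)) := by
    intro k
    induction k with
    | zero =>
      intro p' hpp hpx' hk
      have : p' = x := by omega
      rw [this]; exact hhit
    | succ k ih =>
      intro p' hpp hpx' hk
      by_cases hpe : p' = x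
      · rw [hpe]; exact hhit
      · have hplt : p' < x := by omega
        rw [PySem.List.pyRange_one_cons (by exact_mod_cast (by omega : p' < m))]
        simp only [gnrLoop]
        rw [if_neg (by
          have h0 : (0 : Int) = ((0 : Nat) : Int) := rfl
          rw [h0, PySem.Str.pyGet?_natCast, PySem.Str.pyGet?_natCast]
          rw [beq_eq_false_iff_ne.mpr (hmin p' hpp hplt)]
          simp)]
        rw [show ((p' : Int) + 1) = ((p' + 1 : Nat) : Int) by push_cast; ring]
        exact ih (p' + 1) (by omega) (by omega) (by omega)
  exact H (x - pos) pos (le_refl _) hpx (le_refl _)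

-- ----- the two loops -----

theorem alt_hit (s : String) (d₀ : Nat) (hn : 1 ≤ s.toList.length) (hd : GoodP s.toList d₀)
    (hmin : ∀ y, y < d₀ → ¬ GoodP s.toList y) :
    ∀ (k d : Nat), 1 ≤ d → d ≤ d₀ → d₀ - d ≤ k →
      altLoop s (s.toList.length : Int) (PySem.List.pyRange (d : Int) ((s.toList.length : Int) + 1) 1) =
        ((s.toList.length / d₀ : Nat) : Int) := by
  have hd₀n : d₀ ≤ s.toList.length := Nat.le_of_dvd (by omega) hd.2.1
  have htest : ∀ d : Nat, 1 ≤ d →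
      (((PySem.Int.mod (s.toList.length : Int) (d : Int) == 0) &&
        (pyStrMul (PySem.Str.slice s none (some (d : Int)))
          (PySem.Int.floordiv (s.toList.length : Int) (d : Int)) == s)) = true ↔
        GoodP s.toList d) := by
    intro d h1
    have hslice : PySem.Str.slice s none (some (d : Int)) =
        String.ofList (s.toList.take d) := by
      unfold PySem.Str.slice
      rw [PySem.Chars.slice_eq_listSlice, PySem.List.slice_to s.toList (Int.natCast_nonneg d)]
      simp
    rw [Bool.and_eq_true, hslice]
    unfold pyStrMul
    rw [PySem.Int.mod_natCast, PySem.Int.floordiv_natCast, beq_ofList]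
    simp only [String.toList_ofList, Int.toNat_natCast, beq_iff_eq, decide_eq_true_eq]
    constructor
    · rintro ⟨hmod, hrep⟩
      refine ⟨by omega, ?_, hrep⟩
      exact (Nat.dvd_iff_mod_eq_zero).mpr (by exact_mod_cast hmod)
    · rintro ⟨-, hdvd, hrep⟩
      refine ⟨?_, hrep⟩
      have : s.toList.length % d = 0 := (Nat.dvd_iff_mod_eq_zero).mp hdvd
      exact_mod_cast this
  have hhit : altLoop s (s.toList.length : Int)
      (PySem.List.pyRange (d₀ : Int) ((s.toList.length : Int) + 1) 1) =
      ((s.toList.length / d₀ : Nat) : Int) := by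
    rw [PySem.List.pyRange_one_cons (by exact_mod_cast Nat.lt_succ_of_le hd₀n)]
    simp only [altLoop]
    rw [if_pos ((htest d₀ hd.1).mpr hd)]
    rw [PySem.Int.floordiv_natCast]
  intro k
  induction k with
  | zero =>
    intro d h1 hdle hk
    have : d = d₀ := by omega
    rw [this]; exact hhit
  | succ k ih =>
    intro d h1 hdle hk
    by_cases hde : d = d₀
    · rw [hde]; exact hhit
    · have hdlt : d < d₀ := by omega
      rw [PySem.List.pyRange_one_cons (by exact_mod_cast (by omega : d < s.toList.length + 1))]
      simp only [altLoop]
      rw [if_neg (by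
        intro hcond
        exact hmin d hdlt ((htest d h1).mp hcond))]
      rw [show ((d : Int) + 1) = ((d + 1 : Nat) : Int) by push_cast; ring]
      exact ih (d + 1) (by omega) (by omega) (by omega)

theorem split?_prefix (s : String) (x : Nat) (h1 : 1 ≤ x) (hx : x ≤ s.toList.length) :
    PySem.Str.split? s (String.ofList (s.toList.take x)) =
      some ((PySem.Chars.splitOn s.toList (s.toList.take x)).map String.ofList) := by
  unfold PySem.Str.split? PySem.Chars.split?
  have htl : (String.ofList (s.toList.take x)).toList = s.toList.take x := by simp
  rw [htl]
  have hne : (s.toList.take x).isEmpty = false := by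
    rw [List.isEmpty_eq_false_iff]
    intro h0
    have hl : (s.toList.take x).length = x := by rw [List.length_take]; omega
    rw [h0] at hl; simp at hl; omega
  rw [if_neg (by rw [hne]; simp)]
  rfl

-- one step of A's outer loop, in the regime where the least good length d₀ is still ahead
theorem sol_step (s : String) (d₀ : Nat) (hd : GoodP s.toList d₀)
    (hmin : ∀ y, y < d₀ → ¬ GoodP s.toList y) (hlow : d₀ + 2 ≤ s.toList.length)
    (pos : Nat) (h1 : 1 ≤ pos) (hpd : pos ≤ d₀) :
    solLoop s (PySem.List.pyRange (pos : Int) ((s.toList.length : Int) - 1) 1) =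
        ((s.toList.length / d₀ : Nat) : Int) ∨
      (pos < d₀ ∧
        solLoop s (PySem.List.pyRange (pos : Int) ((s.toList.length : Int) - 1) 1) =
          solLoop s (PySem.List.pyRange ((pos + 1 : Nat) : Int) ((s.toList.length : Int) - 1) 1)) := by
  have hm : (((s.toList.length - 1 : Nat)) : Int) = (s.toList.length : Int) - 1 := by omega
  have hcand₀ : s.toList[d₀]? = s.toList[0]? :=
    cand_of_good s.toList d₀ hd (by omega)
  haveI : DecidablePred (fun y => pos ≤ y ∧ s.toList[y]? = s.toList[0]?) := fun y => by
    infer_instance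
  have hex : ∃ y, pos ≤ y ∧ s.toList[y]? = s.toList[0]? := ⟨d₀, hpd, hcand₀⟩
  have hx₁ := Nat.find_spec hex
  have hx₁le : Nat.find hex ≤ d₀ := Nat.find_min' hex ⟨hpd, hcand₀⟩
  have hgnr : get_next_rep s (pos : Int) =
      some (String.ofList (s.toList.take (Nat.find hex))) := by
    unfold get_next_rep
    have hlen : PySem.Str.len s = (s.toList.length : Int) := rfl
    rw [hlen, ← hm]
    exact gnr_some s pos (Nat.find hex) (s.toList.length - 1) hx₁.1 (by omega) hx₁.2
      (fun y hy1 hy2 => by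
        have hnot := Nat.find_min hex hy2
        intro hcy
        exact hnot ⟨hy1, hcy⟩)
  have hx₁1 : 1 ≤ Nat.find hex := le_trans h1 hx₁.1
  have hx₁2 : Nat.find hex + 2 ≤ s.toList.length := by omega
  have hsplit := split?_prefix s (Nat.find hex) hx₁1 (by omega)
  rw [PySem.List.pyRange_one_cons (by
    have : (pos : Int) < ((s.toList.length - 1 : Nat) : Int) := by exact_mod_cast (by omega : pos < s.toList.length - 1)
    omega)]
  simp only [solLoop]
  rw [hgnr]
  simp only [hsplit]
  obtain ⟨hiff, hlen'⟩ := splitTestS s (Nat.find hex) hx₁1 hx₁2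
  by_cases hgx : GoodP s.toList (Nat.find hex)
  · left
    have hx₁d : Nat.find hex = d₀ := by
      rcases Nat.lt_or_ge (Nat.find hex) d₀ with hlt | hge
      · exact absurd hgx (hmin _ hlt)
      · omega
    rw [if_pos (beq_iff_eq.mpr (hiff.mpr hgx))]
    rw [hlen' hgx, hx₁d]
    push_cast; ring
  · right
    have hx₁lt : Nat.find hex < d₀ := by
      rcases Nat.lt_or_ge (Nat.find hex) d₀ with hlt | hge
      · exact hlt
      · have : Nat.find hex = d₀ := by omega
        rw [this] at hgx; exact absurd hd hgx
    refine ⟨by omega, ?_⟩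
    rw [if_neg (fun hc => hgx (hiff.mp (beq_iff_eq.mp hc)))]
    rw [show ((pos : Int) + 1) = ((pos + 1 : Nat) : Int) by push_cast; ring]

theorem sol_hit (s : String) (d₀ : Nat) (hd : GoodP s.toList d₀)
    (hmin : ∀ y, y < d₀ → ¬ GoodP s.toList y) (hlow : d₀ + 2 ≤ s.toList.length) :
    ∀ (k pos : Nat), 1 ≤ pos → pos ≤ d₀ → d₀ - pos ≤ k →
      solLoop s (PySem.List.pyRange (pos : Int) ((s.toList.length : Int) - 1) 1) =
        ((s.toList.length / d₀ : Nat) : Int) := by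
  intro k
  induction k with
  | zero =>
    intro pos h1 hpd hk
    rcases sol_step s d₀ hd hmin hlow pos h1 hpd with h | ⟨hlt, -⟩
    · exact h
    · omega
  | succ k ih =>
    intro pos h1 hpd hk
    rcases sol_step s d₀ hd hmin hlow pos h1 hpd with h | ⟨hlt, heq⟩
    · exact h
    · rw [heq]
      exact ih (pos + 1) (by omega) (by omega) (by omega)

theorem sol_miss (s : String)
    (hnone : ∀ x, 1 ≤ x → x + 2 ≤ s.toList.length → ¬ GoodP s.toList x) :
    ∀ (k pos : Nat), 1 ≤ pos → s.toList.length - 1 - pos ≤ k →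
      solLoop s (PySem.List.pyRange (pos : Int) ((s.toList.length : Int) - 1) 1) = 1 := by
  have hm : (((s.toList.length - 1 : Nat)) : Int) = (s.toList.length : Int) - 1 ∨
      s.toList.length = 0 := by omega
  intro k
  induction k with
  | zero =>
    intro pos h1 hk
    rw [PySem.List.pyRange_one_eq_nil (by
      have : s.toList.length - 1 ≤ pos := by omega
      omega)]
    rfl
  | succ k ih =>
    intro pos h1 hk
    by_cases hend : s.toList.length - 1 ≤ pos
    · rw [PySem.List.pyRange_one_eq_nil (by omega)]
      rfl
    · push_neg at hend
      have hm' : (((s.toList.length - 1 : Nat)) : Int) = (s.toList.length : Int) - 1 := by omega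
      rw [PySem.List.pyRange_one_cons (by
        have : (pos : Int) < ((s.toList.length - 1 : Nat) : Int) := by exact_mod_cast hend
        omega)]
      simp only [solLoop]
      by_cases hexc : ∃ y, pos ≤ y ∧ y < s.toList.length - 1 ∧ s.toList[y]? = s.toList[0]?
      · haveI : DecidablePred (fun y => pos ≤ y ∧ y < s.toList.length - 1 ∧
            s.toList[y]? = s.toList[0]?) := fun y => by infer_instance
        have hx₁ := Nat.find_spec hexc
        have hgnr : get_next_rep s (pos : Int) =
            some (String.ofList (s.toList.take (Nat.find hexc))) := by
          unfold get_next_rep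
          have hlen : PySem.Str.len s = (s.toList.length : Int) := rfl
          rw [hlen, ← hm']
          exact gnr_some s pos (Nat.find hexc) (s.toList.length - 1) hx₁.1 hx₁.2.1 hx₁.2.2
            (fun y hy1 hy2 => by
              have hnot := Nat.find_min hexc hy2
              intro hcy
              exact hnot ⟨hy1, by omega, hcy⟩)
        rw [hgnr]
        have hx₁1 : 1 ≤ Nat.find hexc := le_trans h1 hx₁.1
        have hx₁2 : Nat.find hexc + 2 ≤ s.toList.length := by omega
        have hsplit := split?_prefix s (Nat.find hexc) hx₁1 (by omega)
        simp only [hsplit]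
        obtain ⟨hiff, -⟩ := splitTestS s (Nat.find hexc) hx₁1 hx₁2
        rw [if_neg (fun hc => hnone _ hx₁1 hx₁2 (hiff.mp (beq_iff_eq.mp hc)))]
        rw [show ((pos : Int) + 1) = ((pos + 1 : Nat) : Int) by push_cast; ring]
        exact ih (pos + 1) (by omega) (by omega)
      · push_neg at hexc
        have hgnr : get_next_rep s (pos : Int) = none := by
          unfold get_next_rep
          have hlen : PySem.Str.len s = (s.toList.length : Int) := rfl
          rw [hlen, ← hm']
          exact gnr_none s pos (s.toList.length - 1)
            (fun x hx1 hx2 => hexc x hx1 hx2)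
        rw [hgnr]

-- ===== VERDICT (by name: the statement is the Claim_ definition above) =====
theorem solution_spec : Claim_unchanged_solution := by
  intro s hdom
  unfold Spec_solution
  intro hnd
  have hlen_s : PySem.Str.len s = (s.toList.length : Int) := rfl
  by_cases hn0 : s.toList.length = 0
  · -- empty string: both return 1
    have hA0 : solution s = 1 := by
      unfold solution
      rw [hlen_s, hn0]
      rw [PySem.List.pyRange_one_eq_nil (by norm_num)]
      rfl
    have hB0 : solution_alt s = 1 := by
      show altLoop s (PySem.Str.len s) (PySem.List.pyRange 1 (PySem.Str.len s + 1) 1) = 1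
      rw [hlen_s, hn0]
      rw [PySem.List.pyRange_one_eq_nil (by norm_num)]
      rfl
    rw [hA0, hB0]
  · have hn1 : 1 ≤ s.toList.length := by omega
    haveI := goodP_dec s.toList
    have hex : ∃ x, GoodP s.toList x :=
      ⟨s.toList.length, goodP_len s.toList (by
        intro h0; rw [h0] at hn0; simp at hn0)⟩
    have hgood : GoodP s.toList (Nat.find hex) := Nat.find_spec hex
    have hmin : ∀ y, y < Nat.find hex → ¬ GoodP s.toList y := fun y hy => Nat.find_min hex hy
    have hd₀1 : 1 ≤ Nat.find hex := hgood.1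
    have hd₀n : Nat.find hex ≤ s.toList.length := Nat.le_of_dvd (by omega) hgood.2.1
    have hB : solution_alt s = ((s.toList.length / Nat.find hex : Nat) : Int) := by
      show altLoop s (PySem.Str.len s)
        (PySem.List.pyRange 1 (PySem.Str.len s + 1) 1) = _
      rw [hlen_s]
      have := alt_hit s (Nat.find hex) hn1 hgood hmin (Nat.find hex) 1 (le_refl _) hd₀1 (by omega)
      simpa using this
    rw [hB]
    rcases Nat.lt_or_ge s.toList.length 3 with h3 | h3
    · -- length 1 or 2
      rcases (by omega : s.toList.length = 1 ∨ s.toList.length = 2) with h1 | h2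
      · -- length 1: A returns 1; d₀ = 1
        have hd₀ : Nat.find hex = 1 := by omega
        unfold solution
        rw [hlen_s, h1]
        rw [PySem.List.pyRange_one_eq_nil (by norm_num)]
        rw [hd₀]
        simp [solLoop]
      · -- length 2, not D: characters differ, so d₀ = 2
        obtain ⟨a, b, hlab⟩ := List.length_eq_two.mp h2
        have hne : a ≠ b := by
          intro hab
          apply hnd
          unfold D_solution
          rw [hlab, hab]
          exact ⟨rfl, rfl⟩
        have hnot1 : ¬ GoodP s.toList 1 := by
          rintro ⟨-, -, hrep⟩
          rw [h2] at hrep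
          rw [hlab] at hrep
          simp [List.replicate_succ] at hrep
          exact hne hrep
        have hd₀2 : Nat.find hex = 2 := by
          have : Nat.find hex ≠ 1 := fun h => hnot1 (h ▸ hgood)
          omega
        unfold solution
        rw [hlen_s, h2]
        rw [show ((2 : Nat) : Int) - 1 = 1 by norm_num]
        rw [PySem.List.pyRange_one_eq_nil (le_refl 1)]
        rw [hd₀2]
        simp [solLoop]
    · -- length ≥ 3
      by_cases hlt : Nat.find hex < s.toList.length
      · -- proper least period: d₀ + 2 ≤ n, A's loop finds it
        have hlow : Nat.find hex + 2 ≤ s.toList.length := by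
          have hk := Nat.mul_div_cancel' hgood.2.1
          by_cases hq0 : s.toList.length / Nat.find hex = 0
          · rw [hq0, Nat.mul_zero] at hk; omega
          by_cases hq1 : s.toList.length / Nat.find hex = 1
          · rw [hq1, Nat.mul_one] at hk; omega
          have hq : 2 ≤ s.toList.length / Nat.find hex := by
            rcases Nat.lt_or_ge (s.toList.length / Nat.find hex) 2 with hlt2 | hge2
            · interval_cases h : s.toList.length / Nat.find hex
              · exact absurd rfl hq0
              · exact absurd rfl hq1
            · exact hge2
          have h2d : Nat.find hex * 2 ≤ s.toList.length := by
            calc Nat.find hex * 2 ≤ Nat.find hex * (s.toList.length / Nat.find hex) :=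
                  Nat.mul_le_mul_left _ hq
              _ = s.toList.length := hk
          omega
        unfold solution
        rw [hlen_s]
        have := sol_hit s (Nat.find hex) hgood hmin hlow (Nat.find hex) 1 (le_refl _) hd₀1 (by omega)
        simpa using this
      · -- no proper period: both sides are 1
        have hd₀ : Nat.find hex = s.toList.length := by omega
        have hnone : ∀ x, 1 ≤ x → x + 2 ≤ s.toList.length → ¬ GoodP s.toList x :=
          fun x _ hx2 => hmin x (by omega)
        unfold solution
        rw [hlen_s]
        rw [hd₀, Nat.div_self (by omega)]
        have := sol_miss s hnone (s.toList.length - 1 - 1) 1 (le_refl _) (le_refl _)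
        simpa using this

theorem solution_changed : Claim_changed_solution := by
  unfold Claim_changed_solution; decide

theorem solution_tight : Claim_exact_solution := by
  intro s hdom hD
  obtain ⟨hlen2, heq⟩ := hD
  obtain ⟨a, b, hlab⟩ := List.length_eq_two.mp hlen2
  have hab : a = b := by rw [hlab] at heq; simpa using heq
  have hlen_s : PySem.Str.len s = (s.toList.length : Int) := rfl
  have hA : solution s = 1 := by
    unfold solution
    rw [hlen_s, hlen2]
    rw [show ((2 : Nat) : Int) - 1 = 1 by norm_num]
    rw [PySem.List.pyRange_one_eq_nil (le_refl 1)]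
    rfl
  have hB : solution_alt s = 2 := by
    show altLoop s (PySem.Str.len s) (PySem.List.pyRange 1 (PySem.Str.len s + 1) 1) = 2
    rw [hlen_s, hlen2]
    rw [PySem.List.pyRange_one_cons (by norm_num)]
    simp only [altLoop]
    rw [if_pos (by
      rw [Bool.and_eq_true]
      constructor
      · decide
      · have hslice : PySem.Str.slice s none (some 1) = String.ofList (s.toList.take 1) := by
          unfold PySem.Str.slice
          rw [PySem.Chars.slice_eq_listSlice, PySem.List.slice_to s.toList (by norm_num)]
          rfl
        rw [hslice]
        unfold pyStrMul
        rw [beq_ofList]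
        rw [hlab, hab]
        simp [List.replicate_succ])]
    decide
  rw [hA, hB]
  decide
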